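-- pv_equiv track=rewrite | github.com/Nic0Byte/wall-build-1 | main.py | _optimize_cutting_layout
-- ===== SOURCE A (Python) =====
-- from typing import List, Tuple, Dict, Optional, Union
--
-- def _optimize_cutting_layout(customs: List[Dict]) -> List[List[int]]:
--     """
--     Ottimizza il layout di taglio raggruppando pezzi simili.
--     Returns: Lista di righe, ogni riga contiene indici dei pezzi.
--     """
--     if not customs:
--         return []
--
--     # Ordina pezzi per altezza decrescente, poi larghezza
--     sorted_indices = sorted(
--         range(len(customs)),
--         key=lambda i: (-customs[i]['height'], -customs[i]['width'])
--     )
--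
--     # Raggruppa in righe di altezza simile
--     rows = []
--     current_row = []
--     current_row_height = None
--     height_tolerance = 50  # mm
--
--     for idx in sorted_indices:
--         piece_height = customs[idx]['height']
--
--         if (current_row_height is None or
--             abs(piece_height - current_row_height) <= height_tolerance):
--             current_row.append(idx)
--             current_row_height = piece_height
--         else:
--             if current_row:
--                 rows.append(current_row)
--             current_row = [idx]
--             current_row_height = piece_height
--
--     if current_row:
--         rows.append(current_row)
--
--     return rows
-- ===== SOURCE B (Python) =====
-- def _optimize_cutting_layout(customs):
--     """
--     Ottimizza il layout di taglio raggruppando pezzi simili.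
--     Returns: Lista di righe, ogni riga contiene indici dei pezzi.
--     """
--     if not customs:
--         return []
--
--     # Same sort: height decreasing, then width decreasing (stable).
--     order = sorted(
--         range(len(customs)),
--         key=lambda i: (-customs[i]['height'], -customs[i]['width'])
--     )
--
--     heights = [customs[i]['height'] for i in order]
--
--     # Phase 1: boundary detection — positions where consecutive sorted heights
--     # differ by more than the tolerance (chaining: each piece vs its predecessor).
--     breaks = [k for k, (prev, cur) in enumerate(zip(heights, heights[1:]), 1)
--               if abs(cur - prev) > 50]
--
--     # Phase 2: partition — slice the sorted index list at the break positions.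
--     bounds = [0] + breaks + [len(order)]
--     return [order[a:b] for a, b in zip(bounds, bounds[1:])]
-- ===== Notes on version B (the rewrite author's own statement) =====
-- stated objective: alternative
-- what changed: Replaces A's inline stateful row-builder (current_row + carried current_row_height, flushed at each break) with a two-phase segmentation: first detect the break positions where consecutive sorted heights differ by more than the tolerance, then partition the sorted index list by slicing it at those positions.
import Mathlib
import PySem

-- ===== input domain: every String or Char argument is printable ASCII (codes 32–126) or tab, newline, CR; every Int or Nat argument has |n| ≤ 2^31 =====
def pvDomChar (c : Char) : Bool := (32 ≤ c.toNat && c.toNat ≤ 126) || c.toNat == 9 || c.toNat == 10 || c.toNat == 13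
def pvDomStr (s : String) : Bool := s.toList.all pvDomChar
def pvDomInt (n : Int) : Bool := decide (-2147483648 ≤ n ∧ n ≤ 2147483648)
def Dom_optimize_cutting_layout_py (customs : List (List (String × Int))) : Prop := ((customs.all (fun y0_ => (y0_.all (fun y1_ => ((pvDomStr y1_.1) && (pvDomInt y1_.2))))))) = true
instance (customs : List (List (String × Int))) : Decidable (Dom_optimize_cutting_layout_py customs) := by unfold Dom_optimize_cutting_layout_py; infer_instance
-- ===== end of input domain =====

-- B replaces A's stateful row-builder with a two-phase segmentation: detect break
-- positions on the sorted heights, then slice the sorted index list at them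
-- (objective: alternative; same sort, different grouping algorithm).

-- Shared dict-access helpers (both Pythons read customs[i]['height'] / ['width'];
-- the dict built from the association list keeps the LAST value per key, as
-- PySem.Dict.ofList does; the default 0 is never reached under Pre_).
def pvHeight (customs : List (List (String × Int))) (i : Int) : Int :=
  ((PySem.Dict.ofList (PySem.List.pyGetD customs i [])).get? "height").getD 0

def pvWidth (customs : List (List (String × Int))) (i : Int) : Int :=
  ((PySem.Dict.ofList (PySem.List.pyGetD customs i [])).get? "width").getD 0

-- sorted(range(len(customs)), key=lambda i: (-h[i], -w[i])) — identical in both Pythons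
def pvSortIdx (customs : List (List (String × Int))) : List Int :=
  PySem.List.sorted2 (PySem.List.pyRange 0 customs.length 1)
    (fun i => -(pvHeight customs i)) (fun i => -(pvWidth customs i))

-- ===== PORT A =====
-- loop state: (rows, current_row, current_row_height)
def pvStepA (customs : List (List (String × Int)))
    (st : List (List Int) × List Int × Option Int) (idx : Int) :
    List (List Int) × List Int × Option Int :=
  let ph := pvHeight customs idx
  if (match st.2.2 with
      | none => true
      | some ch => decide ((ph - ch).natAbs ≤ 50)) = true then
    (st.1, st.2.1 ++ [idx], some ph)
  else
    ((if st.2.1 = [] then st.1 else st.1 ++ [st.2.1]), [idx], some ph)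

def optimize_cutting_layout_py (customs : List (List (String × Int))) : List (List Int) :=
  if customs = [] then []
  else
    let st := (pvSortIdx customs).foldl (pvStepA customs) ([], [], none)
    if st.2.1 = [] then st.1 else st.1 ++ [st.2.1]

-- ===== PORT B =====
-- breaks = [k for k, (prev, cur) in enumerate(zip(heights, heights[1:]), 1) if abs(cur - prev) > 50]
def pvBreaks (heights : List Int) : List Int :=
  (PySem.List.enumerate (heights.zip (PySem.List.slice heights (some 1) none)) 1).filterMap
    (fun kp => if (kp.2.2 - kp.2.1).natAbs > 50 then some kp.1 else none)

def optimize_cutting_layout_py_alt (customs : List (List (String × Int))) : List (List Int) :=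
  if customs = [] then []
  else
    let order := pvSortIdx customs
    let heights := order.map (pvHeight customs)
    let bounds : List Int := 0 :: pvBreaks heights ++ [(order.length : Int)]
    (bounds.zip (PySem.List.slice bounds (some 1) none)).map
      (fun ab => PySem.List.slice order (some ab.1) (some ab.2))

-- ===== PRECONDITION & SPEC =====
-- Pre_ excludes exactly the inputs where the Python A raises KeyError: some piece
-- lacks a 'height' or 'width' key.
def Pre_optimize_cutting_layout_py (customs : List (List (String × Int))) : Prop :=
  (customs.all (fun d => d.any (fun p => p.1 == "height") && d.any (fun p => p.1 == "width"))) = true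
instance (customs : List (List (String × Int))) : Decidable (Pre_optimize_cutting_layout_py customs) := by unfold Pre_optimize_cutting_layout_py; infer_instance

def pvWitness_optimize_cutting_layout_py : (List (List (String × Int))) :=
  [[("height", 2100), ("width", 800)], [("height", 1000), ("width", 600)], [("height", 980), ("width", 400)]]

def Spec_optimize_cutting_layout_py (customs : List (List (String × Int))) (out : List (List Int)) : Prop := out = optimize_cutting_layout_py_alt customs
instance (customs : List (List (String × Int))) (out : List (List Int)) : Decidable (Spec_optimize_cutting_layout_py customs out) := by unfold Spec_optimize_cutting_layout_py; infer_instance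

-- ===== CLAIM (what is proved, stated in full; the proofs are below) =====
def Claim_equal_optimize_cutting_layout_py : Prop := ∀ (customs : List (List (String × Int))), Dom_optimize_cutting_layout_py customs → Pre_optimize_cutting_layout_py customs → Spec_optimize_cutting_layout_py customs (optimize_cutting_layout_py customs)

-- ===== LEMMAS AND PROOFS =====

-- Bridge between the two groupings: the one-step grouping function of the
-- adjacent-chaining semantics (proof-side only; neither port computes with it).
def pvStepC (customs : List (List (String × Int))) (head : Int)
    (rows : List (List Int)) : List (List Int) :=
  match rows with
  | (y :: ys) :: rs =>
    if (pvHeight customs y - pvHeight customs head).natAbs ≤ 50 then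
      (head :: y :: ys) :: rs
    else
      [head] :: (y :: ys) :: rs
  | _ => [head] :: rows

-- how A's current row (cur, ending in a whose height is the carried one) attaches
-- to an already-grouped suffix
def pvGlue (customs : List (List (String × Int))) (cur : List Int) (a : Int) :
    List (List Int) → List (List Int)
  | (y :: ys) :: rs =>
    if (pvHeight customs y - pvHeight customs a).natAbs ≤ 50 then
      (cur ++ y :: ys) :: rs
    else
      cur :: (y :: ys) :: rs
  | _ => [cur]

-- the chained grouping of a nonempty list starts its first row with the list's head
theorem pvAltShape (customs : List (List (String × Int))) (x : Int) (l : List Int) :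
    ∃ t rs, (x :: l).foldr (pvStepC customs) [] = (x :: t) :: rs := by
  induction l generalizing x with
  | nil => exact ⟨[], [], rfl⟩
  | cons y l' ih =>
    obtain ⟨t, rs, ht⟩ := ih y
    simp only [List.foldr] at ht ⊢
    rw [ht]
    by_cases h : (pvHeight customs y - pvHeight customs x).natAbs ≤ 50
    · exact ⟨y :: t, rs, by simp [pvStepC, h]⟩
    · exact ⟨[], (y :: t) :: rs, by simp [pvStepC, h]⟩

-- A-side main loop invariant: A's forward loop from a row ending in a equals
-- rows ++ (that row glued onto the chained grouping of the remainder)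
theorem pvMain (customs : List (List (String × Int))) :
    ∀ (l : List Int) (rows : List (List Int)) (cur : List Int) (a : Int),
    (let st := l.foldl (pvStepA customs) (rows, cur ++ [a], some (pvHeight customs a));
     if st.2.1 = [] then st.1 else st.1 ++ [st.2.1])
    = rows ++ pvGlue customs (cur ++ [a]) a (l.foldr (pvStepC customs) []) := by
  intro l
  induction l with
  | nil =>
    intro rows cur a
    simp [pvGlue, List.foldl, List.foldr]
  | cons x xs ih =>
    intro rows cur a
    simp only [List.foldl, List.foldr]
    have hstep : pvStepA customs (rows, cur ++ [a], some (pvHeight customs a)) x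
        = if (pvHeight customs x - pvHeight customs a).natAbs ≤ 50 then
            (rows, (cur ++ [a]) ++ [x], some (pvHeight customs x))
          else (rows ++ [cur ++ [a]], [x], some (pvHeight customs x)) := by
      unfold pvStepA
      simp
    by_cases hc : (pvHeight customs x - pvHeight customs a).natAbs ≤ 50
    · rw [hstep, if_pos hc]
      have := ih rows (cur ++ [a]) x
      simp only [] at this
      rw [this]
      congr 1
      cases xs with
      | nil =>
        simp only [List.foldr]
        show pvGlue customs (cur ++ [a] ++ [x]) x [] = pvGlue customs (cur ++ [a]) a (pvStepC customs x [])
        simp [pvGlue, pvStepC, hc]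
      | cons y xs' =>
        obtain ⟨t, rs, ht⟩ := pvAltShape customs y xs'
        rw [ht]
        show pvGlue customs (cur ++ [a] ++ [x]) x ((y :: t) :: rs)
          = pvGlue customs (cur ++ [a]) a (pvStepC customs x ((y :: t) :: rs))
        unfold pvStepC
        by_cases hc2 : (pvHeight customs y - pvHeight customs x).natAbs ≤ 50
        · simp [pvGlue, hc, hc2]
        · simp [pvGlue, hc, hc2]
    · rw [hstep, if_neg hc]
      have := ih (rows ++ [cur ++ [a]]) [] x
      simp only [List.nil_append] at this
      rw [this, List.append_assoc]
      congr 1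
      cases xs with
      | nil =>
        simp [pvGlue, pvStepC, hc, List.foldr]
      | cons y xs' =>
        obtain ⟨t, rs, ht⟩ := pvAltShape customs y xs'
        rw [ht]
        unfold pvStepC
        by_cases hc2 : (pvHeight customs y - pvHeight customs x).natAbs ≤ 50
        · simp [pvGlue, hc, hc2]
        · simp [pvGlue, hc, hc2]

-- the sorted index list of a nonempty input is nonempty
theorem pvSortIdx_ne_nil (customs : List (List (String × Int))) (h : customs ≠ []) :
    pvSortIdx customs ≠ [] := by
  intro hnil
  unfold pvSortIdx at hnil
  have hperm := PySem.List.sorted2_perm (PySem.List.pyRange 0 customs.length 1)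
    (fun i => -(pvHeight customs i)) (fun i => -(pvWidth customs i)) false
  rw [hnil] at hperm
  have hlt : (0 : Int) < customs.length := by
    cases customs with
    | nil => exact absurd rfl h
    | cons d ds => simp
  rw [PySem.List.pyRange_one_cons hlt] at hperm
  simpa using hperm.length_eq

-- ===== B-side lemmas: slicing at the detected breaks = chained grouping =====

-- slices of l at a list of bounds, as B computes them
def pvSlices (l : List Int) (bounds : List Int) : List (List Int) :=
  (bounds.zip bounds.tail).map (fun ab => PySem.List.slice l (some ab.1) (some ab.2))

-- structural unfolding of pvBreaks generalized over the enumerate start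
def pvBreaksFrom (hs : List Int) (s : Int) : List Int :=
  (PySem.List.enumerate (hs.zip hs.tail) s).filterMap
    (fun kp => if (kp.2.2 - kp.2.1).natAbs > 50 then some kp.1 else none)

theorem pvBreaks_eq (hs : List Int) : pvBreaks hs = pvBreaksFrom hs 1 := by
  simp [pvBreaks, pvBreaksFrom, PySem.List.slice_from_one]

theorem pvBreaksFrom_cons (a b : Int) (t : List Int) (s : Int) :
    pvBreaksFrom (a :: b :: t) s
      = (if (b - a).natAbs > 50 then [s] else []) ++ pvBreaksFrom (b :: t) (s + 1) := by
  simp only [pvBreaksFrom, List.tail_cons, List.zip_cons_cons, PySem.List.enumerate_cons,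
    List.filterMap_cons]
  split_ifs with h <;> simp

theorem pvBreaksFrom_shift (hs : List Int) : ∀ s : Int,
    pvBreaksFrom hs (s + 1) = (pvBreaksFrom hs s).map (· + 1) := by
  induction hs with
  | nil => intro s; simp [pvBreaksFrom]
  | cons a t ih =>
    intro s
    cases t with
    | nil => simp [pvBreaksFrom]
    | cons b t' =>
      rw [pvBreaksFrom_cons, pvBreaksFrom_cons, ih (s + 1), List.map_append]
      split_ifs with h <;> simp

theorem pvBreaksFrom_nonneg (hs : List Int) : ∀ (s b : Int),
    0 ≤ s → b ∈ pvBreaksFrom hs s → 0 ≤ b := by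
  induction hs with
  | nil => intro s b _ hb; simp [pvBreaksFrom] at hb
  | cons a t ih =>
    intro s b hs0 hb
    cases t with
    | nil => simp [pvBreaksFrom] at hb
    | cons c t' =>
      rw [pvBreaksFrom_cons] at hb
      rcases List.mem_append.mp hb with h1 | h2
      · split_ifs at h1 with h
        · simp at h1; omega
        · simp at h1
      · exact ih (s + 1) b (by omega) h2

-- unfolding pvSlices on a two-element head of the bounds list
theorem pvSlices_cons (l : List Int) (a b : Int) (r : List Int) :
    pvSlices l (a :: b :: r)
      = PySem.List.slice l (some a) (some b) :: pvSlices l (b :: r) := by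
  simp [pvSlices]

-- shifting every bound by one and consing an element to the list leaves the slices unchanged
theorem pvSlices_shift (x : Int) (l : List Int) : ∀ bs : List Int,
    (∀ b ∈ bs, 0 ≤ b) →
    pvSlices (x :: l) (bs.map (· + 1)) = pvSlices l bs := by
  intro bs
  induction bs with
  | nil => intro _; simp [pvSlices]
  | cons a t ih =>
    intro hpos
    cases t with
    | nil => simp [pvSlices]
    | cons b t' =>
      have ha : 0 ≤ a := hpos a (by simp)
      have hb : 0 ≤ b := hpos b (by simp)
      have hrest := ih (fun c hc => hpos c (List.mem_cons_of_mem _ hc))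
      simp only [List.map_cons] at hrest ⊢
      rw [pvSlices_cons, pvSlices_cons, hrest]
      have h1 : PySem.List.slice (x :: l) (some (a + 1)) (some (b + 1))
          = PySem.List.slice l (some a) (some b) := by
        rw [PySem.List.slice_toNat _ (by omega) (by omega),
          PySem.List.slice_toNat _ ha hb]
        have h2 : (a + 1).toNat = a.toNat + 1 := by omega
        have h3 : (b + 1).toNat - (a + 1).toNat = b.toNat - a.toNat := by omega
        rw [h3, h2, List.drop_succ_cons]
      rw [h1]

-- the head slice for a nonnegative first bound: slice (x::l) 0 (c+1) = x :: slice l 0 c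
theorem pvSlice_head (x : Int) (l : List Int) (c : Int) (hc : 0 ≤ c) :
    PySem.List.slice (x :: l) (some 0) (some (c + 1))
      = x :: PySem.List.slice l (some 0) (some c) := by
  rw [PySem.List.slice_toNat _ (by omega) (by omega),
    PySem.List.slice_toNat _ le_rfl hc]
  have h1 : (c + 1).toNat = c.toNat + 1 := by omega
  simp [h1]

-- main B-side lemma: slicing at the breaks equals the chained grouping
theorem pvSlicesEq (customs : List (List (String × Int))) : ∀ (t : List Int) (x : Int),
    pvSlices (x :: t)
      (0 :: pvBreaksFrom ((x :: t).map (pvHeight customs)) 1 ++ [((x :: t).length : Int)])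
    = (x :: t).foldr (pvStepC customs) [] := by
  intro t
  induction t with
  | nil =>
    intro x
    rw [List.foldr_cons, List.foldr_nil]
    show pvSlices [x] (0 :: pvBreaksFrom [pvHeight customs x] 1 ++ [(1 : Int)]) = pvStepC customs x []
    have hbr : pvBreaksFrom [pvHeight customs x] 1 = [] := by simp [pvBreaksFrom]
    rw [hbr]
    show pvSlices [x] [0, 1] = pvStepC customs x []
    rw [pvSlices_cons]
    have h1 : PySem.List.slice [x] (some 0) (some 1) = [x] := by
      rw [PySem.List.slice_toNat _ le_rfl (by omega)]; rfl
    rw [h1]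
    simp [pvSlices, pvStepC]
  | cons y t' ih =>
    intro x
    -- abbreviations
    have hB' : ∀ b ∈ pvBreaksFrom ((y :: t').map (pvHeight customs)) 1, 0 ≤ b :=
      fun b hb => pvBreaksFrom_nonneg _ 1 b (by omega) hb
    obtain ⟨tt, rs, hshape⟩ := pvAltShape customs y t'
    have ihy : pvSlices (y :: t')
        (0 :: pvBreaksFrom ((y :: t').map (pvHeight customs)) 1 ++ [((y :: t').length : Int)])
        = (y :: tt) :: rs := by
      rw [ih y, hshape]
    have hall : ∀ b ∈ (0 : Int) :: pvBreaksFrom ((y :: t').map (pvHeight customs)) 1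
        ++ [((y :: t').length : Int)], 0 ≤ b := by
      intro b hb
      rcases List.mem_cons.mp hb with h0 | h1
      · omega
      · rcases List.mem_append.mp h1 with h2 | h3
        · exact hB' b h2
        · simp at h3; omega
    rw [List.foldr_cons, hshape]
    have hlen : (((x :: y :: t').length : Nat) : Int) = ((y :: t').length : Int) + 1 := by
      simp
    simp only [List.map_cons] at ihy hB' hall ⊢
    rw [hlen]
    have hbr : pvBreaksFrom (pvHeight customs x :: pvHeight customs y :: t'.map (pvHeight customs)) 1
        = (if (pvHeight customs y - pvHeight customs x).natAbs > 50 then [(1 : Int)] else [])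
          ++ (pvBreaksFrom (pvHeight customs y :: t'.map (pvHeight customs)) 1).map (· + 1) := by
      rw [pvBreaksFrom_cons, pvBreaksFrom_shift]
    rw [hbr]
    by_cases hg : (pvHeight customs y - pvHeight customs x).natAbs > 50
    · -- break between x and y: new row [x] in front
      rw [if_pos hg]
      have hstep : pvStepC customs x ((y :: tt) :: rs) = [x] :: (y :: tt) :: rs := by
        simp only [pvStepC]
        rw [if_neg (by omega)]
      rw [hstep]
      have hb1 : (0 : Int) :: ([(1 : Int)]
            ++ (pvBreaksFrom (pvHeight customs y :: t'.map (pvHeight customs)) 1).map (· + 1))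
            ++ [((y :: t').length : Int) + 1]
          = 0 :: 1 :: (((0 : Int) :: pvBreaksFrom (pvHeight customs y :: t'.map (pvHeight customs)) 1
            ++ [((y :: t').length : Int)]).map (· + 1)).tail := by
        simp
      rw [hb1]
      have hb2 : (1 : Int) :: (((0 : Int) :: pvBreaksFrom (pvHeight customs y :: t'.map (pvHeight customs)) 1
            ++ [((y :: t').length : Int)]).map (· + 1)).tail
          = ((0 : Int) :: pvBreaksFrom (pvHeight customs y :: t'.map (pvHeight customs)) 1
            ++ [((y :: t').length : Int)]).map (· + 1) := by
        simp
      rw [pvSlices_cons, hb2, pvSlices_shift x (y :: t') _ hall, ihy]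
      have h1 : PySem.List.slice (x :: y :: t') (some 0) (some 1) = [x] := by
        rw [PySem.List.slice_toNat _ le_rfl (by omega)]; rfl
      rw [h1]
    · -- no break: x joins the first row
      rw [if_neg hg]
      have hstep : pvStepC customs x ((y :: tt) :: rs) = (x :: y :: tt) :: rs := by
        simp only [pvStepC]
        rw [if_pos (by omega)]
      rw [hstep]
      have hne : pvBreaksFrom (pvHeight customs y :: t'.map (pvHeight customs)) 1
          ++ [((y :: t').length : Int)] ≠ [] := by simp
      obtain ⟨c, C', hC⟩ := List.exists_cons_of_ne_nil hne
      have hcC : ∀ b ∈ c :: C', 0 ≤ b := by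
        rw [← hC]
        intro b hb
        rcases List.mem_append.mp hb with h2 | h3
        · exact hB' b h2
        · simp at h3; omega
      have hc0 : 0 ≤ c := hcC c (by simp)
      -- decompose ihy along the head bound c
      rw [List.cons_append, hC, pvSlices_cons] at ihy
      have hh := (List.cons_eq_cons.mp ihy).1
      have hr := (List.cons_eq_cons.mp ihy).2
      -- assemble the left-hand side
      have hb1 : ((0 : Int) :: (pvBreaksFrom (pvHeight customs y :: t'.map (pvHeight customs)) 1).map (· + 1))
            ++ [((y :: t').length : Int) + 1]
          = 0 :: (c + 1) :: (C'.map (· + 1)) := by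
        have : (pvBreaksFrom (pvHeight customs y :: t'.map (pvHeight customs)) 1).map (· + 1)
            ++ [((y :: t').length : Int) + 1] = ((c :: C').map (· + 1)) := by
          rw [← hC]; simp
        simp only [List.cons_append, this, List.map_cons]
      simp only [List.nil_append] at hb1 ⊢
      rw [hb1, pvSlices_cons]
      have hb2 : (c + 1) :: C'.map (· + 1) = (c :: C').map (· + 1) := by simp
      rw [hb2, pvSlices_shift x (y :: t') _ hcC, hr,
        pvSlice_head x (y :: t') c hc0, hh]

-- ===== VERDICT (by name: the statement is the Claim_ definition above) =====
theorem optimize_cutting_layout_py_spec : Claim_equal_optimize_cutting_layout_py := by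
  intro customs _hdom _hpre
  unfold Spec_optimize_cutting_layout_py
  by_cases hc : customs = []
  · simp [optimize_cutting_layout_py, optimize_cutting_layout_py_alt, hc]
  · have hne := pvSortIdx_ne_nil customs hc
    obtain ⟨i0, rest, hsi⟩ := List.exists_cons_of_ne_nil hne
    unfold optimize_cutting_layout_py optimize_cutting_layout_py_alt
    rw [if_neg hc, if_neg hc, hsi]
    -- A side → chained grouping
    simp only [List.foldl]
    have hfirst : pvStepA customs ([], [], none) i0 = ([], [] ++ [i0], some (pvHeight customs i0)) := by
      unfold pvStepA; simp
    rw [hfirst]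
    have hA := pvMain customs rest [] [] i0
    simp only [List.nil_append] at hA ⊢
    rw [hA]
    -- B side → chained grouping
    rw [pvBreaks_eq, PySem.List.slice_from_one]
    show pvGlue customs ([i0]) i0 (rest.foldr (pvStepC customs) [])
      = pvSlices (i0 :: rest)
          (0 :: pvBreaksFrom ((i0 :: rest).map (pvHeight customs)) 1 ++ [((i0 :: rest).length : Int)])
    rw [pvSlicesEq customs rest i0]
    -- glue of a singleton row onto the chained grouping of the tail = full chained grouping
    cases rest with
    | nil => simp [pvGlue, pvStepC, List.foldr]
    | cons y rest' =>
      obtain ⟨t, rs, ht⟩ := pvAltShape customs y rest'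
      simp only [List.foldr] at ht ⊢
      rw [ht]
      unfold pvStepC
      by_cases hc2 : (pvHeight customs y - pvHeight customs i0).natAbs ≤ 50
      · simp [pvGlue, hc2]
      · simp [pvGlue, hc2]
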